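-- pv_equiv track=rewrite | github.com/robinxbaker/Tarpaulin-Course-Management-Tool-Backend | main.py | get_basic_url
-- ===== SOURCE A (Python) =====
-- def get_basic_url(current_url):
--     basic_url = ""
--     slash_count = 0
--     for char in str(current_url): # This makes url for me to return
--         if char == "/":
--             if slash_count < 3:
--                 slash_count += 1
--         if slash_count != 3:
--             basic_url += char
--     return basic_url
-- ===== SOURCE B (Python) =====
-- def get_basic_url(current_url):
--     parts = str(current_url).split("/")
--     return "/".join(parts[:3])
-- ===== Notes on version B (the rewrite author's own statement) =====
-- stated objective: faster
-- what changed: Replaces the per-character Python loop with a slash counter and string concatenation by one split on the slash separator plus a join of the first three segments, moving the scan into C-level string methods.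
import Mathlib
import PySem

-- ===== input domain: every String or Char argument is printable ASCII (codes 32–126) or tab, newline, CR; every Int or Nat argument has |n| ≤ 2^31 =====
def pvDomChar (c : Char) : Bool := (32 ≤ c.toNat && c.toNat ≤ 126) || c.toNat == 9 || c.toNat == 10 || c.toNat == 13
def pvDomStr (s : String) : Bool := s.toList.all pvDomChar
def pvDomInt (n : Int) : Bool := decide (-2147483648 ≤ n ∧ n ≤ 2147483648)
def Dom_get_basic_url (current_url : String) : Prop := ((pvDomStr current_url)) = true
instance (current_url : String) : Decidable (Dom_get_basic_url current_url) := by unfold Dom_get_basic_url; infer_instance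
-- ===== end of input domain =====

-- B replaces A's character scan with a slash counter by split('/') + '/'.join of the first three segments (idiomatic); same result proved for every string.

-- ===== PORT A =====
-- loop body of A: update slash_count, then append the char unless slash_count == 3
def stepA (p : List Char × Int) (c : Char) : List Char × Int :=
  let slash_count : Int := if c = '/' then (if p.2 < 3 then p.2 + 1 else p.2) else p.2
  if slash_count ≠ 3 then (p.1 ++ [c], slash_count) else (p.1, slash_count)

def get_basic_url (current_url : String) : String :=
  String.mk (current_url.toList.foldl stepA ([], 0)).1

-- ===== PORT B =====
def get_basic_url_alt (current_url : String) : String :=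
  let parts := PySem.Chars.splitOn current_url.toList ['/']
  String.mk (PySem.Chars.join ['/'] (parts.take 3))

-- ===== PRECONDITION & SPEC =====
def Spec_get_basic_url (current_url : String) (out : String) : Prop := out = get_basic_url_alt current_url
instance (current_url : String) (out : String) : Decidable (Spec_get_basic_url current_url out) := by unfold Spec_get_basic_url; infer_instance

-- ===== CLAIM (what is proved, stated in full; the proofs are below) =====
def Claim_equal_get_basic_url : Prop := ∀ (current_url : String), Dom_get_basic_url current_url → Spec_get_basic_url current_url (get_basic_url current_url)

-- ===== LEMMAS AND PROOFS =====

-- fuel-free form of splitOn on the single-character separator '/'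
def sp : List Char → List (List Char)
  | [] => [[]]
  | c :: t =>
    match sp t with
    | [] => [[]]
    | h :: r => if c = '/' then [] :: h :: r else (c :: h) :: r

lemma sp_ne_nil (l : List Char) : sp l ≠ [] := by
  cases l with
  | nil => simp [sp]
  | cons c t =>
    simp only [sp]
    rcases h : sp t with _ | ⟨h', r⟩ <;> simp <;> split <;> simp

lemma go_spec : ∀ (fuel : Nat) (l cur : List Char) (acc : List (List Char)),
    l.length < fuel →
    PySem.Chars.splitOn.go ['/'] fuel l cur acc =
      acc.reverse ++ (match sp l with
        | [] => []
        | h :: r => (cur.reverse ++ h) :: r) := by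
  intro fuel
  induction fuel with
  | zero => intro l cur acc h; omega
  | succ f ih =>
    intro l cur acc h
    cases l with
    | nil => simp [PySem.Chars.splitOn.go, sp]
    | cons c t =>
      by_cases hc : c = '/'
      · subst hc
        have : PySem.Chars.splitOn.go ['/'] (f+1) ('/' :: t) cur acc =
            PySem.Chars.splitOn.go ['/'] f t [] (cur.reverse :: acc) := by
          simp [PySem.Chars.splitOn.go, List.isPrefixOf]
        rw [this, ih t [] (cur.reverse :: acc) (by simpa using h)]
        rcases hsp : sp t with _ | ⟨h', r⟩
        · exact absurd hsp (sp_ne_nil t)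
        · simp [sp, hsp]
      · have : PySem.Chars.splitOn.go ['/'] (f+1) (c :: t) cur acc =
            PySem.Chars.splitOn.go ['/'] f t (c :: cur) acc := by
          simp [PySem.Chars.splitOn.go, List.isPrefixOf, Ne.symm hc]
        rw [this, ih t (c :: cur) acc (by simpa using h)]
        rcases hsp : sp t with _ | ⟨h', r⟩
        · exact absurd hsp (sp_ne_nil t)
        · simp [sp, hsp, hc]

lemma splitOn_eq_sp (l : List Char) : PySem.Chars.splitOn l ['/'] = sp l := by
  have := go_spec (l.length + 1) l [] [] (by omega)
  rcases hsp : sp l with _ | ⟨h, r⟩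
  · exact absurd hsp (sp_ne_nil l)
  · simpa [PySem.Chars.splitOn, hsp] using this

-- the common value: the characters of l strictly before its k-th '/' (slashes before it kept)
def g : Nat → List Char → List Char
  | _, [] => []
  | k, c :: t => if c = '/' then (if k ≤ 1 then [] else '/' :: g (k-1) t) else c :: g k t

lemma join_cons_head (sep h : List Char) (c : Char) (xs : List (List Char)) :
    PySem.Chars.join sep ((c :: h) :: xs) = c :: PySem.Chars.join sep (h :: xs) := by
  cases xs <;> simp [PySem.Chars.join, List.intercalate]

lemma join_take_sp : ∀ (l : List Char) (k : Nat), 1 ≤ k →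
    PySem.Chars.join ['/'] ((sp l).take k) = g k l := by
  intro l
  induction l with
  | nil =>
    intro k hk
    cases k with
    | zero => omega
    | succ k => simp [sp, g, PySem.Chars.join, List.intercalate]
  | cons c t ih =>
    intro k hk
    rcases hsp : sp t with _ | ⟨h, r⟩
    · exact absurd hsp (sp_ne_nil t)
    · by_cases hc : c = '/'
      · subst hc
        rcases Nat.lt_or_ge k 2 with hk1 | hk2
        · interval_cases k
          simp [sp, hsp, g, PySem.Chars.join, List.intercalate]
        · obtain ⟨k', rfl⟩ : ∃ k', k = k' + 2 := ⟨k - 2, by omega⟩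
          have hrec := ih (k' + 1) (by omega)
          rw [hsp, List.take_succ_cons] at hrec
          simp only [sp, hsp, g, if_true, List.take_succ_cons]
          rw [show k' + 2 - 1 = k' + 1 by omega]
          rw [if_neg (show ¬ (k' + 2 ≤ 1) by omega)]
          rw [PySem.Chars.join_cons_cons, hrec]
          rfl
      · cases k with
        | zero => omega
        | succ k' =>
          have := ih (k' + 1) (by omega)
          rw [hsp] at this
          rw [List.take_succ_cons] at this
          simp only [sp, hsp, if_neg hc, g, List.take_succ_cons]
          rw [join_cons_head, this]

lemma loop3 : ∀ (l : List Char) (acc : List Char),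
    (l.foldl stepA (acc, 3)).1 = acc := by
  intro l
  induction l with
  | nil => intro acc; rfl
  | cons c t ih =>
    intro acc
    have : stepA (acc, 3) c = (acc, 3) := by
      by_cases hc : c = '/' <;> simp [stepA, hc]
    rw [List.foldl_cons, this, ih]

lemma loopA : ∀ (l : List Char) (acc : List Char) (k : Nat), 1 ≤ k → k ≤ 3 →
    (l.foldl stepA (acc, 3 - (k : Int))).1 = acc ++ g k l := by
  intro l
  induction l with
  | nil => intro acc k h1 h3; simp [g]
  | cons c t ih =>
    intro acc k h1 h3
    by_cases hc : c = '/'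
    · subst hc
      have hlt : (3 : Int) - (k : Int) < 3 := by omega
      cases k with
      | zero => omega
      | succ k' =>
        cases k' with
        | zero =>
          have : stepA (acc, 3 - ((1:Nat) : Int)) '/' = (acc, 3) := by
            simp [stepA]
          rw [List.foldl_cons, this, loop3]
          simp [g]
        | succ k'' =>
          have hstep : stepA (acc, 3 - ((k'' + 2 : Nat) : Int)) '/' =
              (acc ++ ['/'], 3 - ((k'' + 1 : Nat) : Int)) := by
            simp only [stepA, if_true]
            rw [if_pos (show (3 : Int) - ((k'' + 2 : Nat) : Int) < 3 by push_cast; omega)]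
            rw [if_pos (show (3 : Int) - ((k'' + 2 : Nat) : Int) + 1 ≠ 3 by push_cast; omega)]
            simp only [Prod.mk.injEq]
            exact ⟨trivial, by push_cast; omega⟩
          rw [List.foldl_cons, hstep, ih (acc ++ ['/']) (k'' + 1) (by omega) (by omega)]
          simp [g]
    · have hstep : stepA (acc, 3 - (k : Int)) c = (acc ++ [c], 3 - (k : Int)) := by
        simp only [stepA]
        rw [if_neg hc, if_pos (by omega)]
      rw [List.foldl_cons, hstep, ih (acc ++ [c]) k h1 h3]
      simp [g, hc]

-- ===== VERDICT (by name: the statement is the Claim_ definition above) =====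
theorem get_basic_url_spec : Claim_equal_get_basic_url := by
  intro s _
  show get_basic_url s = get_basic_url_alt s
  have hA : (s.toList.foldl stepA ([], 0)).1 = g 3 s.toList := by
    have := loopA s.toList [] 3 (by omega) (by omega)
    simpa using this
  have hB : PySem.Chars.join ['/'] ((PySem.Chars.splitOn s.toList ['/']).take 3) = g 3 s.toList := by
    rw [splitOn_eq_sp, join_take_sp s.toList 3 (by omega)]
  show String.mk ((s.toList.foldl stepA ([], 0)).1) =
    String.mk (PySem.Chars.join ['/'] ((PySem.Chars.splitOn s.toList ['/']).take 3))
  rw [hA, hB]
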